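-- pv_equiv track=rewrite | github.com/trungpd56/aoc2023 | day11/a.py | expanse
-- ===== SOURCE A (Python) =====
-- def expanse(image: list[str], n:int =1) -> list[str]:
--     nlist = []
--     for line in image:
--         nlist.append(line)
--         if all(c == "." for c in line):
--             for _ in range(n):
--                 nlist.append(line)
--     ncols = []
--     for line in zip(*nlist):
--         ncols.append(line)
--         if all(c == "." for c in line):
--             for _ in range(n):
--                 ncols.append(line)
--     return list(zip(*ncols))
-- ===== SOURCE B (Python) =====
-- def expanse(image: list[str], n: int = 1) -> list[str]:
--     cols = list(zip(*image))
--     col_empty = [all(c == "." for c in col) for col in cols]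
--     out = []
--     for i, line in enumerate(image):
--         row = ()
--         for j, col in enumerate(cols):
--             row += (col[i],)
--             if col_empty[j]:
--                 row += (col[i],) * n
--         out.append(row)
--         if all(c == "." for c in line):
--             out += [row] * n
--     return out
-- ===== Notes on version B (the rewrite author's own statement) =====
-- stated objective: simpler
-- what changed: B replaces A's expand-rows/transpose/expand-columns/transpose pipeline by one transpose to find the empty columns followed by a single row pass that widens each row in place and duplicates all-dot rows as it emits them; Pre_ excludes grids containing an empty line (zero-width grids), where A's double zip-transpose yields the empty grid while B yields one empty row per line — neither value is specified for such a degenerate grid.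
-- outside the precondition, e.g. on expanse(['ab', ''], 1): A returns [], B returns [(), (), ()]
import Mathlib
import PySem

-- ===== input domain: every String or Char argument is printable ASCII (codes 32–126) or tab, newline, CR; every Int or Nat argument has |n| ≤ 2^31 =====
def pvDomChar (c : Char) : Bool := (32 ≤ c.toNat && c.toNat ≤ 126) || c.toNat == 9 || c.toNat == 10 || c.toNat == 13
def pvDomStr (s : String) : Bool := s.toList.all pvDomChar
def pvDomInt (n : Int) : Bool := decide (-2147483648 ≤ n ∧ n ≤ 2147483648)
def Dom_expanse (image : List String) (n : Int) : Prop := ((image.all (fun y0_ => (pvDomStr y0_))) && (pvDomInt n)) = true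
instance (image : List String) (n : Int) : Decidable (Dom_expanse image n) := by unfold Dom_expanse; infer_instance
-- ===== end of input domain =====

-- B finds the empty columns with one transpose and then widens/duplicates rows in a single
-- pass, instead of A's expand-rows/transpose/expand-columns/transpose pipeline (objective:
-- simpler).

-- `all(c == "." for c in line)`
def pvAllDots (l : List Char) : Bool := l.all (· == '.')

-- minimum length among the lists (0 for the empty list of lists) — the truncation
-- length used by Python's zip(*xs)
def pvMinLen : List (List Char) → Nat
  | [] => 0
  | [r] => r.length
  | r :: s :: t => min r.length (pvMinLen (s :: t))

-- zip(*xs): tuples of the i-th elements, truncated at the shortest list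
def pvZipStar (xs : List (List Char)) : List (List Char) :=
  (List.range (pvMinLen xs)).map (fun i => xs.map (fun r => r.getD i '.'))

-- ===== PORT A =====
def expanse (image : List String) (n : Int) : List (List String) :=
  let nlist := image.foldl
    (fun acc line => (acc ++ [line]) ++
      (if pvAllDots line.toList then List.replicate n.toNat line else [])) []
  let ncols := (pvZipStar (nlist.map String.toList)).foldl
    (fun acc col => (acc ++ [col]) ++
      (if pvAllDots col then List.replicate n.toNat col else [])) []
  (pvZipStar ncols).map (fun row => row.map (fun c => String.ofList [c]))

-- ===== PORT B =====
-- faithful to Source B: `cols = list(zip(*image))`, `col_empty`, then one indexed row pass;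
-- `col[i]` and `col_empty[j]` are in range on every run of Source B, so `.getD` is exact there;
-- `(c,) * n` / `[row] * n` with a negative n is the empty sequence = `List.replicate n.toNat`.
def expanse_alt (image : List String) (n : Int) : List (List String) :=
  let cols := pvZipStar (image.map String.toList)
  let colEmpty := cols.map pvAllDots
  let out := image.zipIdx.foldl (fun out (p : String × Nat) =>
      let row := cols.zipIdx.foldl (fun row (q : List Char × Nat) =>
          (row ++ [q.1.getD p.2 '.']) ++
          (if colEmpty.getD q.2 false then List.replicate n.toNat (q.1.getD p.2 '.') else [])) []
      (out ++ [row]) ++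
      (if pvAllDots p.1.toList then List.replicate n.toNat row else [])) []
  out.map (fun row => row.map (fun c => String.ofList [c]))

-- ===== PRECONDITION & SPEC =====
-- Pre_ excludes grids containing an empty line (zero-width grids): there A's double
-- zip-transpose yields the empty grid while B yields one empty row per line, and neither
-- value is specified for such a degenerate grid.
def Pre_expanse (image : List String) (n : Int) : Prop := ∀ s ∈ image, s ≠ ""
instance (image : List String) (n : Int) : Decidable (Pre_expanse image n) := by unfold Pre_expanse; infer_instance
def pvWitness_expanse : List String × Int := (["#.", ".."], 1)
def Spec_expanse (image : List String) (n : Int) (out : List (List String)) : Prop := out = expanse_alt image n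
instance (image : List String) (n : Int) (out : List (List String)) : Decidable (Spec_expanse image n out) := by unfold Spec_expanse; infer_instance

-- ===== CLAIM (what is proved, stated in full; the proofs are below) =====
def Claim_equal_expanse : Prop := ∀ (image : List String) (n : Int), Dom_expanse image n → Pre_expanse image n → Spec_expanse image n (expanse image n)

-- ===== LEMMAS AND PROOFS =====

-- the block a grid line contributes: itself, plus k copies if it is all dots
def pvBlk (k : Nat) (r : List Char) : List (List Char) := r :: if pvAllDots r then List.replicate k r else []

def pvEC (rows : List (List Char)) (j : Nat) : Bool := rows.all (fun r => r.getD j '.' == '.')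

theorem pvZipStar_def (xs : List (List Char)) :
    pvZipStar xs = (List.range (pvMinLen xs)).map (fun i => xs.map (fun r => r.getD i '.')) := rfl

def pvERow (rows : List (List Char)) (k : Nat) (r : List Char) : List Char :=
  (List.range (pvMinLen rows)).flatMap (fun j =>
    r.getD j '.' :: (if pvEC rows j then List.replicate k (r.getD j '.') else []))

theorem pv_foldl_push {α β : Type} (g : α → β) (h : α → List β) (l : List α) (init : List β) :
    l.foldl (fun acc x => (acc ++ [g x]) ++ h x) init = init ++ l.flatMap (fun x => g x :: h x) := by
  induction l generalizing init with
  | nil => simp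
  | cons a t ih => rw [List.foldl_cons, ih]; simp

theorem pv_mem_blk {k : Nat} {r c : List Char} (h : c ∈ pvBlk k r) : c = r := by
  unfold pvBlk at h
  rcases List.mem_cons.mp h with h | h
  · exact h
  · split at h
    · exact List.eq_of_mem_replicate h
    · simp at h

theorem pv_mem_blk_self (k : Nat) (r : List Char) : r ∈ pvBlk k r := by
  simp [pvBlk]

theorem pv_map_blk {α : Type} {k : Nat} (f : List Char → α) (r : List Char) :
    (pvBlk k r).map f = f r :: (if pvAllDots r then List.replicate k (f r) else []) := by
  unfold pvBlk
  split <;> simp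

theorem pv_all_blk {k : Nat} (p : List Char → Bool) (r : List Char) :
    (pvBlk k r).all p = p r := by
  unfold pvBlk
  split <;> cases hp : p r <;> simp [hp, List.all_replicate]

theorem pvMinLen_le {xs : List (List Char)} {r : List Char} (h : r ∈ xs) :
    pvMinLen xs ≤ r.length := by
  induction xs with
  | nil => simp at h
  | cons a t ih =>
    cases t with
    | nil =>
      have hr : r = a := by simpa using h
      subst hr; simp [pvMinLen]
    | cons b u =>
      simp only [pvMinLen]
      rcases List.mem_cons.mp h with hr | h2
      · subst hr; exact min_le_left _ _
      · exact le_trans (min_le_right _ _) (ih h2)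

theorem pvMinLen_attained {xs : List (List Char)} (h : xs ≠ []) :
    ∃ r ∈ xs, pvMinLen xs = r.length := by
  induction xs with
  | nil => simp at h
  | cons a t ih =>
    cases t with
    | nil => exact ⟨a, by simp, rfl⟩
    | cons b u =>
      obtain ⟨r, hr, hlen⟩ := ih (by simp)
      simp only [pvMinLen]
      by_cases hc : a.length ≤ pvMinLen (b :: u)
      · exact ⟨a, by simp, by omega⟩
      · exact ⟨r, List.mem_cons_of_mem _ hr, by omega⟩

theorem pvMinLen_flatMap_blk {k : Nat} {rows : List (List Char)} (h : rows ≠ []) :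
    pvMinLen (rows.flatMap (pvBlk k)) = pvMinLen rows := by
  have hne : rows.flatMap (pvBlk k) ≠ [] := by
    cases rows with
    | nil => simp at h
    | cons a t => simp [pvBlk]
  obtain ⟨r, hr, hlen⟩ := pvMinLen_attained h
  obtain ⟨c, hc, hclen⟩ := pvMinLen_attained hne
  obtain ⟨r', hr', hcr'⟩ := List.mem_flatMap.mp hc
  have hcr : c = r' := pv_mem_blk hcr'
  apply le_antisymm
  · rw [hlen]
    exact pvMinLen_le (List.mem_flatMap.mpr ⟨r, hr, pv_mem_blk_self k r⟩)
  · rw [hclen, hcr]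
    exact pvMinLen_le hr'

theorem pv_all_flatMap_blk {k : Nat} (p : List Char → Bool) (rows : List (List Char)) :
    (rows.flatMap (pvBlk k)).all p = rows.all p := by
  induction rows with
  | nil => simp
  | cons a t ih => simp [List.flatMap_cons, List.all_append, pv_all_blk, ih]

theorem pv_getD_map_gen {α β : Type} {l : List α} {t : Nat} (h : t < l.length)
    (f : α → β) (d : β) (d0 : α) :
    (l.map f).getD t d = f (l.getD t d0) := by
  simp [List.getD_eq_getElem?_getD, List.getElem?_map, List.getElem?_eq_getElem h]

theorem pv_getD_map {l : List (List Char)} {t : Nat} (h : t < l.length)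
    (f : List Char → Char) (d : Char) :
    (l.map f).getD t d = f (l.getD t []) := by
  simp [List.getD_eq_getElem?_getD, List.getElem?_map, List.getElem?_eq_getElem h]

theorem pv_range_map_getD (l : List (List Char)) (f : List Char → List Char) :
    (List.range l.length).map (fun t => f (l.getD t [])) = l.map f := by
  apply List.ext_getElem
  · simp
  · intro i h1 h2
    simp only [List.getElem_map, List.getElem_range]
    rw [List.getD_eq_getElem?_getD, List.getElem?_eq_getElem (by simpa using h2)]
    simp

theorem pv_A_core (rows : List (List Char)) (k : Nat) :
    pvZipStar ((pvZipStar (rows.flatMap (pvBlk k))).flatMap (pvBlk k)) =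
      (if rows.isEmpty then [] else if pvMinLen rows = 0 then [] else
        rows.flatMap (fun r =>
          pvERow rows k r :: (if pvAllDots r then List.replicate k (pvERow rows k r) else []))) := by
  by_cases h0 : rows = []
  · subst h0; simp [pvZipStar, pvMinLen]
  have hMN : pvMinLen (rows.flatMap (pvBlk k)) = pvMinLen rows := pvMinLen_flatMap_blk h0
  by_cases hL : pvMinLen rows = 0
  · simp [pvZipStar, hMN, hL, h0, pvMinLen]
  set N1 := rows.flatMap (pvBlk k) with hN1
  set L := pvMinLen rows with hLdef
  have hC : pvZipStar N1 = (List.range L).map (fun i => N1.map (fun r => r.getD i '.')) := by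
    simp [pvZipStar, hMN]
  have hN2 : (pvZipStar N1).flatMap (pvBlk k) =
      (List.range L).flatMap (fun i => pvBlk k (N1.map (fun r => r.getD i '.'))) := by
    rw [hC, List.flatMap_map]
  have hN2ne : (pvZipStar N1).flatMap (pvBlk k) ≠ [] := by
    rw [hN2]
    have : (0 : Nat) ∈ List.range L := by simp; omega
    intro hcon
    have hmem : (N1.map (fun r => r.getD 0 '.')) ∈
        (List.range L).flatMap (fun i => pvBlk k (N1.map (fun r => r.getD i '.'))) := by
      refine List.mem_flatMap.mpr ⟨0, this, ?_⟩
      exact pv_mem_blk_self _ _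
    rw [hcon] at hmem; simp at hmem
  have hlenN2 : pvMinLen ((pvZipStar N1).flatMap (pvBlk k)) = N1.length := by
    obtain ⟨c, hc, hclen⟩ := pvMinLen_attained hN2ne
    rw [hN2] at hc
    obtain ⟨i, _, hci⟩ := List.mem_flatMap.mp hc
    rw [hclen, pv_mem_blk hci, List.length_map]
  have hEC : ∀ i, pvAllDots (N1.map (fun r => r.getD i '.')) = pvEC rows i := by
    intro i
    show (N1.map (fun r => r.getD i '.')).all (· == '.') = _
    rw [List.all_map, hN1]
    show (rows.flatMap (pvBlk k)).all (fun r => r.getD i '.' == '.') = _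
    rw [pv_all_flatMap_blk]
    rfl
  have hrow : ∀ t ∈ List.range N1.length,
      ((pvZipStar N1).flatMap (pvBlk k)).map (fun c => c.getD t '.') =
        pvERow rows k (N1.getD t []) := by
    intro t ht
    have ht' : t < N1.length := List.mem_range.mp ht
    rw [hN2, List.map_flatMap]
    unfold pvERow
    rw [← hLdef]
    apply List.flatMap_congr
    intro i _
    rw [pv_map_blk, hEC i, pv_getD_map ht']
  calc pvZipStar ((pvZipStar N1).flatMap (pvBlk k))
      = (List.range N1.length).map (fun t =>
          ((pvZipStar N1).flatMap (pvBlk k)).map (fun c => c.getD t '.')) := by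
        rw [pvZipStar_def ((pvZipStar N1).flatMap (pvBlk k)), hlenN2]
    _ = (List.range N1.length).map (fun t => pvERow rows k (N1.getD t [])) :=
        List.map_congr_left hrow
    _ = N1.map (pvERow rows k) := pv_range_map_getD N1 (pvERow rows k)
    _ = rows.flatMap (fun r => (pvBlk k r).map (pvERow rows k)) := by
        rw [hN1, List.map_flatMap]
    _ = rows.flatMap (fun r =>
          pvERow rows k r :: (if pvAllDots r then List.replicate k (pvERow rows k r) else [])) := by
        apply List.flatMap_congr
        intro r _
        rw [pv_map_blk]
    _ = _ := by simp [h0, hL]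

-- flatMap over zipIdx, component views
theorem pv_flatMap_zipIdx {α β : Type} (l : List α) (d : α) (f : α → Nat → List β) :
    l.zipIdx.flatMap (fun p => f p.1 p.2) =
      (List.range l.length).flatMap (fun i => f (l.getD i d) i) := by
  have h1 : l.zipIdx.flatMap (fun p => f p.1 p.2) =
      l.zipIdx.flatMap (fun p => f (l.getD p.2 d) p.2) := by
    apply List.flatMap_congr
    intro p hp
    obtain ⟨x, i⟩ := p
    obtain ⟨-, hi, hx⟩ := List.mem_zipIdx hp
    simp only [Nat.zero_add, Nat.sub_zero] at hi hx
    have hgd : l.getD i d = x := by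
      rw [List.getD_eq_getElem?_getD, List.getElem?_eq_getElem (by omega)]
      simp [hx]
    rw [List.getD_eq_getElem?_getD] at hgd
    simp [hgd]
  rw [h1]
  have h2 : l.zipIdx.flatMap (fun p => f (l.getD p.2 d) p.2) =
      (l.zipIdx.map Prod.snd).flatMap (fun i => f (l.getD i d) i) := by
    rw [List.flatMap_map]
  rw [h2, List.zipIdx_map_snd, ← List.range_eq_range']

theorem pv_flatMap_zipIdx_fst {α β : Type} (l : List α) (g : α → List β) :
    l.zipIdx.flatMap (fun p => g p.1) = l.flatMap g := by
  have := List.flatMap_map (l := l.zipIdx) (f := Prod.fst) (g := g)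
  rw [← this, List.zipIdx_map_fst]

-- B's inner fold builds exactly the expanded row pvERow
theorem pv_B_row (rows : List (List Char)) (k : Nat) (i : Nat) (hi : i < rows.length) :
    (pvZipStar rows).zipIdx.foldl (fun row (q : List Char × Nat) =>
        (row ++ [q.1.getD i '.']) ++
        (if ((pvZipStar rows).map pvAllDots).getD q.2 false then
          List.replicate k (q.1.getD i '.') else [])) [] =
      pvERow rows k (rows.getD i []) := by
  rw [pv_foldl_push (fun q : List Char × Nat => q.1.getD i '.')
      (fun q : List Char × Nat =>
        if ((pvZipStar rows).map pvAllDots).getD q.2 false then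
          List.replicate k (q.1.getD i '.') else []), List.nil_append]
  rw [pv_flatMap_zipIdx (pvZipStar rows) []
      (fun col j => col.getD i '.' ::
        (if ((pvZipStar rows).map pvAllDots).getD j false then
          List.replicate k (col.getD i '.') else []))]
  unfold pvERow
  have hlen : (pvZipStar rows).length = pvMinLen rows := by simp [pvZipStar]
  rw [hlen]
  apply List.flatMap_congr
  intro j hj
  have hj' : j < pvMinLen rows := List.mem_range.mp hj
  have hjlen : j < (pvZipStar rows).length := by omega
  have hcol : (pvZipStar rows).getD j [] = rows.map (fun r => r.getD j '.') := by
    rw [List.getD_eq_getElem?_getD, List.getElem?_eq_getElem hjlen]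
    simp [pvZipStar]
  have hget : (rows.map (fun r => r.getD j '.')).getD i '.' = (rows.getD i []).getD j '.' :=
    pv_getD_map hi (fun r => r.getD j '.') '.'
  have hempty : ((pvZipStar rows).map pvAllDots).getD j false = pvEC rows j := by
    rw [pv_getD_map_gen hjlen pvAllDots false [], hcol]
    show (rows.map (fun r => r.getD j '.')).all (· == '.') = _
    rw [List.all_map]; rfl
  rw [hcol, hget, hempty]

-- ===== VERDICT (by name: the statement is the Claim_ definition above) =====
theorem expanse_spec : Claim_equal_expanse := by
  intro image n _ hpre
  unfold Spec_expanse
  show expanse image n = expanse_alt image n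
  set k := n.toNat with hk
  set rows := image.map String.toList with hrows
  -- A reduces to pv_A_core's right-hand side
  have hnlist : image.foldl
      (fun acc line => (acc ++ [line]) ++
        (if pvAllDots line.toList then List.replicate k line else [])) [] =
      image.flatMap (fun line =>
        line :: (if pvAllDots line.toList then List.replicate k line else [])) := by
    rw [pv_foldl_push]; simp
  have hN1map : (image.flatMap (fun line =>
        line :: (if pvAllDots line.toList then List.replicate k line else []))).map String.toList =
      rows.flatMap (pvBlk k) := by
    rw [List.map_flatMap, hrows, List.flatMap_map]
    apply List.flatMap_congr
    intro line _
    simp [pvBlk, apply_ite (List.map String.toList)]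
  have hcols : ∀ (xs : List (List Char)), xs.foldl
      (fun acc col => (acc ++ [col]) ++
        (if pvAllDots col then List.replicate k col else [])) [] = xs.flatMap (pvBlk k) := by
    intro xs
    rw [pv_foldl_push]; simp only [List.nil_append]; rfl
  have hA : expanse image n =
      (pvZipStar ((pvZipStar (rows.flatMap (pvBlk k))).flatMap (pvBlk k))).map
        (fun row => row.map (fun c => String.ofList [c])) := by
    simp only [expanse, ← hk, hnlist, hN1map, hcols]
  -- B reduces to the flatMap-of-blocks form
  have hB : expanse_alt image n =
      (image.zipIdx.flatMap (fun p : String × Nat =>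
        ((pvZipStar rows).zipIdx.foldl (fun row (q : List Char × Nat) =>
            (row ++ [q.1.getD p.2 '.']) ++
            (if ((pvZipStar rows).map pvAllDots).getD q.2 false then
              List.replicate k (q.1.getD p.2 '.') else [])) []) ::
        (if pvAllDots p.1.toList then
          List.replicate k
            ((pvZipStar rows).zipIdx.foldl (fun row (q : List Char × Nat) =>
              (row ++ [q.1.getD p.2 '.']) ++
              (if ((pvZipStar rows).map pvAllDots).getD q.2 false then
                List.replicate k (q.1.getD p.2 '.') else [])) [])
          else []))).map (fun row => row.map (fun c => String.ofList [c])) := by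
    simp only [expanse_alt, ← hk, ← hrows]
    rw [pv_foldl_push]
    simp
  by_cases h0 : image = []
  · subst h0
    rw [hA, hB]
    simp [hrows, pvZipStar, pvMinLen]
  have h0r : rows ≠ [] := by simpa [hrows] using h0
  have hL : pvMinLen rows ≠ 0 := by
    obtain ⟨r, hr, hlen⟩ := pvMinLen_attained h0r
    obtain ⟨line, hline, hlr⟩ := List.mem_map.mp (hrows ▸ hr)
    have : line ≠ "" := hpre line hline
    have : r.length ≠ 0 := by
      intro hcon
      apply this
      rw [← hlr] at hcon
      exact String.toList_eq_nil_iff.mp (List.eq_nil_of_length_eq_zero hcon)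
    omega
  rw [hA, pv_A_core, if_neg (by simp [h0r]), if_neg hL, hB]
  congr 1
  symm
  have hbody : ∀ p ∈ image.zipIdx,
      ((pvZipStar rows).zipIdx.foldl (fun row (q : List Char × Nat) =>
          (row ++ [q.1.getD p.2 '.']) ++
          (if ((pvZipStar rows).map pvAllDots).getD q.2 false then
            List.replicate k (q.1.getD p.2 '.') else [])) []) =
        pvERow rows k p.1.toList := by
    intro p hp
    obtain ⟨x, i⟩ := p
    obtain ⟨-, hi, hx⟩ := List.mem_zipIdx hp
    simp only [Nat.zero_add, Nat.sub_zero] at hi hx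
    have hi' : i < rows.length := by simp [hrows]; omega
    rw [pv_B_row rows k i hi']
    congr 1
    rw [List.getD_eq_getElem?_getD, List.getElem?_eq_getElem hi']
    simp [hrows, hx]
  calc image.zipIdx.flatMap (fun p : String × Nat =>
        ((pvZipStar rows).zipIdx.foldl (fun row (q : List Char × Nat) =>
            (row ++ [q.1.getD p.2 '.']) ++
            (if ((pvZipStar rows).map pvAllDots).getD q.2 false then
              List.replicate k (q.1.getD p.2 '.') else [])) []) ::
        (if pvAllDots p.1.toList then
          List.replicate k
            ((pvZipStar rows).zipIdx.foldl (fun row (q : List Char × Nat) =>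
              (row ++ [q.1.getD p.2 '.']) ++
              (if ((pvZipStar rows).map pvAllDots).getD q.2 false then
                List.replicate k (q.1.getD p.2 '.') else [])) [])
          else []))
      = image.zipIdx.flatMap (fun p : String × Nat =>
          pvERow rows k p.1.toList ::
          (if pvAllDots p.1.toList then List.replicate k (pvERow rows k p.1.toList) else [])) := by
        apply List.flatMap_congr
        intro p hp
        rw [hbody p hp]
    _ = image.flatMap (fun line =>
          pvERow rows k line.toList ::
          (if pvAllDots line.toList then List.replicate k (pvERow rows k line.toList) else [])) :=
        pv_flatMap_zipIdx_fst image (fun line =>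
          pvERow rows k line.toList ::
          (if pvAllDots line.toList then List.replicate k (pvERow rows k line.toList) else []))
    _ = rows.flatMap (fun r =>
          pvERow rows k r :: (if pvAllDots r then List.replicate k (pvERow rows k r) else [])) := by
        rw [hrows, List.flatMap_map]
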